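-- pv_equiv track=rewrite | github.com/genbio-ai/ModelGenerator | modelgenerator/data/data.py | replace_characters_at_indices
-- ===== SOURCE A (Python) =====
-- def replace_characters_at_indices(
--     s: str, indices: list[int], replacement_char: str
-- ) -> str:
--     """Replace characters at given indices in a string
--
--     Args:
--         s (str): The input string
--         indices (list[int]): The indices to replace
--         replacement_char (str): The character to replace with
--
--     Returns:
--         str: The modified string
--     """
--     s_list = list(s)
--     for index in indices:
--         if 0 <= index < len(s_list):
--             s_list[index] = replacement_char
--     return "".join(s_list)
-- ===== SOURCE B (Python) =====
-- def replace_characters_at_indices(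
--     s: str, indices: list[int], replacement_char: str
-- ) -> str:
--     idx_set = set(indices)
--     return "".join(
--         replacement_char if i in idx_set else c for i, c in enumerate(s)
--     )
-- ===== Notes on version B (the rewrite author's own statement) =====
-- stated objective: idiomatic
-- what changed: Instead of mutating a list of characters by looping over the indices, B builds a set of the indices once and assembles the result in a single comprehension over enumerate(s), substituting the replacement where the position is in the set.
import Mathlib
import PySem

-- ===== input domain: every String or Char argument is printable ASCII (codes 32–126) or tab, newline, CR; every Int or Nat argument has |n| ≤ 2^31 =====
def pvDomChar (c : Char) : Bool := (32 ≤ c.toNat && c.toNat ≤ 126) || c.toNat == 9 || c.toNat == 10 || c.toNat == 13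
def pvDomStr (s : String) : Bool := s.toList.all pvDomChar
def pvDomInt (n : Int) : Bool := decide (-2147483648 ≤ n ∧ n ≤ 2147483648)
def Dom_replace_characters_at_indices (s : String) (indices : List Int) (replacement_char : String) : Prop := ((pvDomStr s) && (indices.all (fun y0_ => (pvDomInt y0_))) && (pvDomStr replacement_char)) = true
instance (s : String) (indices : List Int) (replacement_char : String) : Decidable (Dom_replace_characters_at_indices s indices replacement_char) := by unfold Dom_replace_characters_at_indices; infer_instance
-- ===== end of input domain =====

-- B replaces A's in-place mutation over the index list by a set of indices and a single
-- comprehension over enumerate(s); idiomatic, same cost, proved to return the same string.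


-- ===== PORT A =====
-- the loop body: 'if 0 <= index < len(s_list): s_list[index] = replacement_char'
def pvStepA (replacement_char : String) (l : List String) (index : Int) : List String :=
  if 0 ≤ index ∧ index < (l.length : Int) then l.set index.toNat replacement_char else l

def replace_characters_at_indices (s : String) (indices : List Int) (replacement_char : String) : String :=
  let s_list : List String := s.toList.map (fun c => String.singleton c)
  let s_list := indices.foldl (pvStepA replacement_char) s_list
  PySem.Str.join "" s_list

-- ===== PORT B =====
def replace_characters_at_indices_alt (s : String) (indices : List Int) (replacement_char : String) : String :=
  let idx_set : PySem.Set Int := PySem.Set.ofList indices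
  PySem.Str.join "" ((PySem.List.enumerate s.toList 0).map
    (fun p => if PySem.Set.contains idx_set p.1 then replacement_char else String.singleton p.2))

-- ===== PRECONDITION & SPEC =====
def Spec_replace_characters_at_indices (s : String) (indices : List Int) (replacement_char : String) (out : String) : Prop := out = replace_characters_at_indices_alt s indices replacement_char
instance (s : String) (indices : List Int) (replacement_char : String) (out : String) : Decidable (Spec_replace_characters_at_indices s indices replacement_char out) := by unfold Spec_replace_characters_at_indices; infer_instance

-- ===== CLAIM (what is proved, stated in full; the proofs are below) =====
def Claim_equal_replace_characters_at_indices : Prop := ∀ (s : String) (indices : List Int) (replacement_char : String), Dom_replace_characters_at_indices s indices replacement_char → Spec_replace_characters_at_indices s indices replacement_char (replace_characters_at_indices s indices replacement_char)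

-- ===== LEMMAS AND PROOFS =====

theorem pvFoldA_length (rc : String) (indices : List Int) (l : List String) :
    (indices.foldl (pvStepA rc) l).length = l.length := by
  induction indices generalizing l with
  | nil => rfl
  | cons i rest ih =>
    simp only [List.foldl_cons]
    rw [ih]
    unfold pvStepA
    split <;> simp

theorem pvFoldA_getElem (rc : String) (indices : List Int) (l : List String)
    (j : Nat) (hj : j < l.length) :
    (indices.foldl (pvStepA rc) l)[j]'(by rw [pvFoldA_length]; exact hj) =
      if (j : Int) ∈ indices then rc else l[j] := by
  induction indices generalizing l with
  | nil => simp
  | cons i rest ih =>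
    simp only [List.foldl_cons]
    have hlen : (pvStepA rc l i).length = l.length := by
      unfold pvStepA; split <;> simp
    rw [ih (pvStepA rc l i) (by rw [hlen]; exact hj)]
    by_cases hm : (j : Int) ∈ rest
    · simp [hm]
    · by_cases hij : i = (j : Int)
      · subst hij
        have : pvStepA rc l (j : Int) = l.set j rc := by
          unfold pvStepA
          rw [if_pos ⟨Int.natCast_nonneg j, by exact_mod_cast hj⟩]
          simp
        simp [hm, this]
      · have : (pvStepA rc l i)[j]'(by rw [hlen]; exact hj) = l[j] := by
          unfold pvStepA
          split
          · next hg =>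
            rw [List.getElem_set_ne]
            intro h
            exact hij (by omega)
          · rfl
        have hne : ¬ ((j : Int) = i) := fun h => hij h.symm
        simp [List.mem_cons, hm, this, hne]

theorem replace_characters_at_indices_eq (s : String) (indices : List Int) (rc : String) :
    replace_characters_at_indices s indices rc = replace_characters_at_indices_alt s indices rc := by
  unfold replace_characters_at_indices replace_characters_at_indices_alt
  apply congrArg (PySem.Str.join "")
  apply List.ext_getElem
  · rw [pvFoldA_length]
    simp [PySem.List.length_enumerate]
  · intro j h1 h2
    have hj : j < s.toList.length := by
      have := pvFoldA_length rc indices (s.toList.map (fun c => String.singleton c))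
      simp [this] at h1
      simpa using h1
    rw [pvFoldA_getElem rc indices _ j (by simpa using hj)]
    simp [List.getElem_map, PySem.List.getElem_enumerate, PySem.Set.contains,
      PySem.Set.mem_ofList]

-- ===== VERDICT (by name: the statement is the Claim_ definition above) =====
theorem replace_characters_at_indices_spec : Claim_equal_replace_characters_at_indices := by
  intro s indices rc _
  exact replace_characters_at_indices_eq s indices rc
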